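-- pv_equiv track=rewrite | github.com/Teeheeq/Legacy | Shuffle.py | file_Name_Generator
-- ===== SOURCE A (Python) =====
-- def file_Name_Generator(dates_list, weekly_dates_list, DocTypeTags):
--     #This function will generate a list of file names based on the dates in the list
--     #The list will be used to search for the files
--     #The files will be moved to the active directory
--     file_name_list_A= []
--     file_name_list_B= []
--     file_name_list_C= []
--     file_name_list_D= []
--     file_name_list_E= []
--     file_name_list_F= []
--     for n in DocTypeTags:
--         for i in dates_list:
--             if n == "A":
--                 file_name_list_A.append(n + " - " + i + ".docx")
--             elif n == "C":
--                 file_name_list_C.append(n + " - " + i + ".docx")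
--             elif n == "D":
--                 file_name_list_D.append(n + " - " + i + ".docx")
--             elif n == "E":
--                 file_name_list_E.append(n + " - " + i + ".docx")
--             elif n == "F":
--                 file_name_list_F.append(n + " - " + i + ".docx")
--         for i in weekly_dates_list:
--             if n == "B":
--                 file_name_list_B.append(n + " - " + i + ".docx")
--     return(file_name_list_A, file_name_list_B, file_name_list_C, file_name_list_D, file_name_list_E, file_name_list_F)
-- ===== SOURCE B (Python) =====
-- def file_Name_Generator(dates_list, weekly_dates_list, DocTypeTags):
--     # Per-tag comprehensions instead of one stateful pass with six accumulators.
--     def names(t):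
--         src = weekly_dates_list if t == "B" else dates_list
--         return [n + " - " + i + ".docx" for n in DocTypeTags if n == t for i in src]
--     return tuple(names(t) for t in "ABCDEF")
-- ===== Notes on version B (the rewrite author's own statement) =====
-- stated objective: faster
-- what changed: Replaces the single stateful pass with six mutable accumulators and an if/elif chain scanning dates_list for every tag by six per-tag comprehensions (filter the tags, map the selected source), so non-matching tags cost O(1) instead of a full scan of dates_list.
import Mathlib
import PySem

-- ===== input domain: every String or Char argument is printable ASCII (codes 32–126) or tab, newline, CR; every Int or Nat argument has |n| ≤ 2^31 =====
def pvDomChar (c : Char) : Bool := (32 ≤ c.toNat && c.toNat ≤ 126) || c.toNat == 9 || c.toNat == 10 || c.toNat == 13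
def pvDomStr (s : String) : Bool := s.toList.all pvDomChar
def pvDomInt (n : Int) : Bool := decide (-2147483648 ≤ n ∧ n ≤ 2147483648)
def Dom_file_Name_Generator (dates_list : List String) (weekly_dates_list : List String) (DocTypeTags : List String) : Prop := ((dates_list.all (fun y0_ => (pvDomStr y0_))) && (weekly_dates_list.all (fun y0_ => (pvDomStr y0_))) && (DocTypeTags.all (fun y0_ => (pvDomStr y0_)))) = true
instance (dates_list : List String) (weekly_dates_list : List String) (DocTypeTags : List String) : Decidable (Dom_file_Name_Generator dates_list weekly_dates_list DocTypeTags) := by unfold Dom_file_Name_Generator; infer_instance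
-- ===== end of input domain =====

-- ===== PORT A =====
def file_Name_Generator (dates_list : List String) (weekly_dates_list : List String) (DocTypeTags : List String) : List String × List String × List String × List String × List String × List String :=
  let init : List String × List String × List String × List String × List String × List String :=
    ([], [], [], [], [], [])
  let final := DocTypeTags.foldl (fun st n =>
    let st := dates_list.foldl (fun (st : List String × List String × List String × List String × List String × List String) i =>
      let (a, b, c, d, e, f) := st
      if n == "A" then (a ++ [n ++ " - " ++ i ++ ".docx"], b, c, d, e, f)
      else if n == "C" then (a, b, c ++ [n ++ " - " ++ i ++ ".docx"], d, e, f)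
      else if n == "D" then (a, b, c, d ++ [n ++ " - " ++ i ++ ".docx"], e, f)
      else if n == "E" then (a, b, c, d, e ++ [n ++ " - " ++ i ++ ".docx"], f)
      else if n == "F" then (a, b, c, d, e, f ++ [n ++ " - " ++ i ++ ".docx"])
      else (a, b, c, d, e, f)) st
    weekly_dates_list.foldl (fun (st : List String × List String × List String × List String × List String × List String) i =>
      let (a, b, c, d, e, f) := st
      if n == "B" then (a, b ++ [n ++ " - " ++ i ++ ".docx"], c, d, e, f)
      else (a, b, c, d, e, f)) st) init
  final

-- ===== PORT B =====
-- B: per-tag comprehension (filter the tags, map the selected source list)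
def fng_names (dates_list : List String) (weekly_dates_list : List String) (DocTypeTags : List String) (t : String) : List String :=
  let src := if t == "B" then weekly_dates_list else dates_list
  (DocTypeTags.filter (fun n => n == t)).flatMap (fun n => src.map (fun i => n ++ " - " ++ i ++ ".docx"))

def file_Name_Generator_alt (dates_list : List String) (weekly_dates_list : List String) (DocTypeTags : List String) : List String × List String × List String × List String × List String × List String :=
  (fng_names dates_list weekly_dates_list DocTypeTags "A",
   fng_names dates_list weekly_dates_list DocTypeTags "B",
   fng_names dates_list weekly_dates_list DocTypeTags "C",
   fng_names dates_list weekly_dates_list DocTypeTags "D",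
   fng_names dates_list weekly_dates_list DocTypeTags "E",
   fng_names dates_list weekly_dates_list DocTypeTags "F")

-- ===== PRECONDITION & SPEC =====
def Spec_file_Name_Generator (dates_list : List String) (weekly_dates_list : List String) (DocTypeTags : List String) (out : List String × List String × List String × List String × List String × List String) : Prop := out = file_Name_Generator_alt dates_list weekly_dates_list DocTypeTags
instance (dates_list : List String) (weekly_dates_list : List String) (DocTypeTags : List String) (out : List String × List String × List String × List String × List String × List String) : Decidable (Spec_file_Name_Generator dates_list weekly_dates_list DocTypeTags out) := by unfold Spec_file_Name_Generator; infer_instance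

-- ===== CLAIM (what is proved, stated in full; the proofs are below) =====
def Claim_equal_file_Name_Generator : Prop := ∀ (dates_list : List String) (weekly_dates_list : List String) (DocTypeTags : List String), Dom_file_Name_Generator dates_list weekly_dates_list DocTypeTags → Spec_file_Name_Generator dates_list weekly_dates_list DocTypeTags (file_Name_Generator dates_list weekly_dates_list DocTypeTags)

-- ===== LEMMAS AND PROOFS =====


-- the filenames a single tag occurrence n contributes to the list for tag t
def fng_contrib (src : List String) (n : String) : List String :=
  src.map (fun i => n ++ " - " ++ i ++ ".docx")

theorem fng_names_cons (d w : List String) (n : String) (tags : List String) (t : String) :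
    fng_names d w (n :: tags) t =
      (if n == t then fng_contrib (if t == "B" then w else d) n else []) ++ fng_names d w tags t := by
  simp only [fng_names, fng_contrib, List.filter_cons]
  by_cases h : n == t <;> simp [h]

theorem foldl_app1 (xs : List String) (h : String → String) (a b c e f g : List String) :
    xs.foldl (fun (st : List String × List String × List String × List String × List String × List String) i => (st.1 ++ [h i], st.2)) (a, b, c, e, f, g) = (a ++ xs.map h, b, c, e, f, g) := by
  induction xs generalizing a with
  | nil => simp
  | cons x xs ih => simp [ih]

theorem foldl_app2 (xs : List String) (h : String → String) (a b c e f g : List String) :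
    xs.foldl (fun (st : List String × List String × List String × List String × List String × List String) i => (st.1, st.2.1 ++ [h i], st.2.2)) (a, b, c, e, f, g) = (a, b ++ xs.map h, c, e, f, g) := by
  induction xs generalizing b with
  | nil => simp
  | cons x xs ih => simp [ih]

theorem foldl_app3 (xs : List String) (h : String → String) (a b c e f g : List String) :
    xs.foldl (fun (st : List String × List String × List String × List String × List String × List String) i => (st.1, st.2.1, st.2.2.1 ++ [h i], st.2.2.2)) (a, b, c, e, f, g) = (a, b, c ++ xs.map h, e, f, g) := by
  induction xs generalizing c with
  | nil => simp
  | cons x xs ih => simp [ih]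

theorem foldl_app4 (xs : List String) (h : String → String) (a b c e f g : List String) :
    xs.foldl (fun (st : List String × List String × List String × List String × List String × List String) i => (st.1, st.2.1, st.2.2.1, st.2.2.2.1 ++ [h i], st.2.2.2.2)) (a, b, c, e, f, g) = (a, b, c, e ++ xs.map h, f, g) := by
  induction xs generalizing e with
  | nil => simp
  | cons x xs ih => simp [ih]

theorem foldl_app5 (xs : List String) (h : String → String) (a b c e f g : List String) :
    xs.foldl (fun (st : List String × List String × List String × List String × List String × List String) i => (st.1, st.2.1, st.2.2.1, st.2.2.2.1, st.2.2.2.2.1 ++ [h i], st.2.2.2.2.2)) (a, b, c, e, f, g) = (a, b, c, e, f ++ xs.map h, g) := by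
  induction xs generalizing f with
  | nil => simp
  | cons x xs ih => simp [ih]

theorem foldl_app6 (xs : List String) (h : String → String) (a b c e f g : List String) :
    xs.foldl (fun (st : List String × List String × List String × List String × List String × List String) i => (st.1, st.2.1, st.2.2.1, st.2.2.2.1, st.2.2.2.2.1, st.2.2.2.2.2 ++ [h i])) (a, b, c, e, f, g) = (a, b, c, e, f, g ++ xs.map h) := by
  induction xs generalizing g with
  | nil => simp
  | cons x xs ih => simp [ih]

theorem fng_inner_dates (d : List String) (n : String)
    (a b c e f g : List String) :
    d.foldl (fun (st : List String × List String × List String × List String × List String × List String) i =>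
      let (a, b, c, e, f, g) := st
      if n == "A" then (a ++ [n ++ " - " ++ i ++ ".docx"], b, c, e, f, g)
      else if n == "C" then (a, b, c ++ [n ++ " - " ++ i ++ ".docx"], e, f, g)
      else if n == "D" then (a, b, c, e ++ [n ++ " - " ++ i ++ ".docx"], f, g)
      else if n == "E" then (a, b, c, e, f ++ [n ++ " - " ++ i ++ ".docx"], g)
      else if n == "F" then (a, b, c, e, f, g ++ [n ++ " - " ++ i ++ ".docx"])
      else (a, b, c, e, f, g)) (a, b, c, e, f, g) =
      (a ++ (if n == "A" then fng_contrib d n else []), b,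
       c ++ (if n == "C" then fng_contrib d n else []),
       e ++ (if n == "D" then fng_contrib d n else []),
       f ++ (if n == "E" then fng_contrib d n else []),
       g ++ (if n == "F" then fng_contrib d n else [])) := by
  by_cases hA : n == "A"
  · have h : n = "A" := by simpa using hA
    subst h; simp [fng_contrib, foldl_app1]
  · by_cases hC : n == "C"
    · have h : n = "C" := by simpa using hC
      subst h; simp [fng_contrib, foldl_app3]
    · by_cases hD : n == "D"
      · have h : n = "D" := by simpa using hD
        subst h; simp [fng_contrib, foldl_app4]
      · by_cases hE : n == "E"
        · have h : n = "E" := by simpa using hE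
          subst h; simp [fng_contrib, foldl_app5]
        · by_cases hF : n == "F"
          · have h : n = "F" := by simpa using hF
            subst h; simp [fng_contrib, foldl_app6]
          · simp [hA, hC, hD, hE, hF]

theorem fng_inner_weekly (w : List String) (n : String)
    (a b c e f g : List String) :
    w.foldl (fun (st : List String × List String × List String × List String × List String × List String) i =>
      let (a, b, c, e, f, g) := st
      if n == "B" then (a, b ++ [n ++ " - " ++ i ++ ".docx"], c, e, f, g)
      else (a, b, c, e, f, g)) (a, b, c, e, f, g) =
      (a, b ++ (if n == "B" then fng_contrib w n else []), c, e, f, g) := by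
  by_cases hB : n == "B"
  · have h : n = "B" := by simpa using hB
    subst h; simp [fng_contrib, foldl_app2]
  · simp [hB]

theorem fng_foldl (d w : List String) (tags : List String)
    (a b c e f g : List String) :
    tags.foldl (fun st n =>
      let st := d.foldl (fun (st : List String × List String × List String × List String × List String × List String) i =>
        let (a, b, c, e, f, g) := st
        if n == "A" then (a ++ [n ++ " - " ++ i ++ ".docx"], b, c, e, f, g)
        else if n == "C" then (a, b, c ++ [n ++ " - " ++ i ++ ".docx"], e, f, g)
        else if n == "D" then (a, b, c, e ++ [n ++ " - " ++ i ++ ".docx"], f, g)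
        else if n == "E" then (a, b, c, e, f ++ [n ++ " - " ++ i ++ ".docx"], g)
        else if n == "F" then (a, b, c, e, f, g ++ [n ++ " - " ++ i ++ ".docx"])
        else (a, b, c, e, f, g)) st
      w.foldl (fun (st : List String × List String × List String × List String × List String × List String) i =>
        let (a, b, c, e, f, g) := st
        if n == "B" then (a, b ++ [n ++ " - " ++ i ++ ".docx"], c, e, f, g)
        else (a, b, c, e, f, g)) st) (a, b, c, e, f, g) =
      (a ++ fng_names d w tags "A", b ++ fng_names d w tags "B",
       c ++ fng_names d w tags "C", e ++ fng_names d w tags "D",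
       f ++ fng_names d w tags "E", g ++ fng_names d w tags "F") := by
  induction tags generalizing a b c e f g with
  | nil => simp [fng_names]
  | cons n tags ih =>
    simp only [List.foldl_cons]
    rw [fng_inner_dates, fng_inner_weekly, ih]
    simp only [fng_names_cons]
    by_cases hB : n == "B"
    · have : (n == "A") = false ∧ (n == "C") = false ∧ (n == "D") = false ∧
             (n == "E") = false ∧ (n == "F") = false := by
        refine ⟨?_, ?_, ?_, ?_, ?_⟩ <;> (simp only [beq_iff_eq] at hB ⊢; simp [hB])
      simp [hB, this.1, this.2.1, this.2.2.1, this.2.2.2.1, this.2.2.2.2]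
    · simp [hB]

-- ===== VERDICT (by name: the statement is the Claim_ definition above) =====
theorem file_Name_Generator_spec : Claim_equal_file_Name_Generator := by
  intro d w tags _
  unfold Spec_file_Name_Generator file_Name_Generator file_Name_Generator_alt
  simpa using fng_foldl d w tags [] [] [] [] [] []
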